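-- pv_equiv track=rewrite | github.com/AdvancedPhotonSource/tike | src/tike/communicators/mpi.py | combined_shape
-- ===== SOURCE A (Python) =====
-- import typing
--
-- def combined_shape(
--     shapes: typing.List[typing.Tuple[int, ...]],
--     axis: typing.Union[int, None] = 0,
-- ) -> typing.List[int]:
--     """Return the `shape` for `shapes` concatenated along the `axis`.
--
--     >>> combined_shape([(5, 2, 3), (1, 2, 3)], axis=0)
--     [6, 2, 3]
--
--     >>> combined_shape([(5, 2, 7), (1, 2, 3)], axis=0)
--     Traceback (most recent call last):
--         ...
--     ValueError: All dimensions except for the named `axis` must be equal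
--
--     >>> combined_shape([(1, 5, 3), (1, 5, 3)], axis=None)
--     [2, 1, 5, 3]
--
--     """
--     first = shapes[0]
--     ndim = len(first)
--     for shape in shapes[1:]:
--         if ndim != len(shape):
--             msg = 'All shapes must have the same number of dimensions'
--             raise ValueError(msg)
--         for dim in range(ndim):
--             if dim != axis and first[dim] != shape[dim]:
--                 msg = 'All dimensions except for the named `axis` must be equal'
--                 raise ValueError(msg)
--
--     if axis is None:
--         return [len(shapes), *first]
--
--     combined = list()
--
--     for dim in range(ndim):
--         if dim == axis:
--             combined.append(sum(shape[dim] for shape in shapes))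
--         else:
--             combined.append(first[dim])
--
--     return combined
-- ===== SOURCE B (Python) =====
-- def combined_shape(shapes, axis=0):
--     first = shapes[0]
--     ndim = len(first)
--     if any(len(shape) != ndim for shape in shapes[1:]):
--         raise ValueError('All shapes must have the same number of dimensions')
--     columns = list(zip(*shapes))
--     if any((i != axis) and any(v != col[0] for v in col)
--            for i, col in enumerate(columns)):
--         raise ValueError('All dimensions except for the named `axis` must be equal')
--     if axis is None:
--         return [len(shapes), *first]
--     return [sum(col) if i == axis else col[0] for i, col in enumerate(columns)]
-- ===== Notes on version B (the rewrite author's own statement) =====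
-- stated objective: alternative
-- what changed: Replaces the nested per-shape/per-dimension validation loop and the second per-dimension build loop with a transpose (zip(*shapes)): one any() pass validates ndim, one enumerate pass over columns both validates off-axis equality and builds the result (sum of the axis column, first element elsewhere).
import Mathlib
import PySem

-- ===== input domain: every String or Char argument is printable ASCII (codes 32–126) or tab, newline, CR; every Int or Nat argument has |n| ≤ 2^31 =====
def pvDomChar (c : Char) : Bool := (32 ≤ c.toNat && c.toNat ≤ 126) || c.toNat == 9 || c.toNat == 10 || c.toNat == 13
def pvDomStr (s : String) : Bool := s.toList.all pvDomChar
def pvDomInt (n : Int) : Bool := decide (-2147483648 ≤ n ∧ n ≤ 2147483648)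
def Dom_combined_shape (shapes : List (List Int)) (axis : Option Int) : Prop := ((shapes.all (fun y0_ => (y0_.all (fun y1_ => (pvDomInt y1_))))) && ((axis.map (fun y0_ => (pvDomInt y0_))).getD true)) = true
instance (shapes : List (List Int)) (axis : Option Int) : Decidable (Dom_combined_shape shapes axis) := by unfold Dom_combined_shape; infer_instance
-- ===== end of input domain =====

-- B replaces A's nested validation loop and second build loop by a transpose (zip(*shapes))
-- plus a single pass over the columns; same cost, different decomposition (objective: alternative).
-- On inputs excluded by Pre_ both Pythons raise (possibly with different ValueError messages).

-- shared tiny helper: Python's 'dim != axis' (axis None compares unequal to every int)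
def dimNe (axis : Option Int) (dim : Int) : Bool :=
  match axis with
  | none => true
  | some a => dim != a

-- ===== PORT A =====
-- literal port of A; where A raises (IndexError on empty shapes, the two ValueErrors) the port
-- returns [] — those inputs are excluded by Pre_.
def combined_shape (shapes : List (List Int)) (axis : Option Int) : List Int :=
  match shapes with
  | [] => []  -- shapes[0] raises IndexError
  | first :: rest =>
    let ndim := first.length
    if rest.all (fun (shape : List Int) =>
        (ndim == shape.length) &&
        (List.range ndim).all (fun (dim : Nat) =>
          !(dimNe axis (dim : Int) && (first.getD dim 0 != shape.getD dim 0))))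
    then
      match axis with
      | none => (((first :: rest).length : Int)) :: first
      | some a =>
        (List.range ndim).foldl (fun (combined : List Int) (dim : Nat) =>
          if (dim : Int) == a then
            combined ++ [((first :: rest).map (fun shape => shape.getD dim 0)).sum]
          else
            combined ++ [first.getD dim 0]) []
    else []  -- ValueError

-- ===== PORT B =====
-- zip(*shapes): repeatedly take heads while every row is nonempty (Python zip truncation rule).
def zipStar (rows : List (List Int)) : List (List Int) :=
  if h : rows.isEmpty || rows.any (·.isEmpty) then []
  else (rows.map (·.headD 0)) :: zipStar (rows.map List.tail)
  termination_by (rows.headD []).length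
  decreasing_by
    simp only [Bool.or_eq_true, not_or, List.isEmpty_iff, List.any_eq_true, not_exists] at h
    obtain ⟨h1, h2⟩ := h
    match rows, h1 with
    | r :: rs, _ =>
      have hr : r ≠ [] := fun hcon => h2 r ⟨List.mem_cons_self, hcon⟩
      simpa using Nat.sub_lt (List.length_pos_of_ne_nil hr) Nat.one_pos

def combined_shape_alt (shapes : List (List Int)) (axis : Option Int) : List Int :=
  match shapes with
  | [] => []  -- shapes[0] raises IndexError
  | first :: rest =>
    let ndim := first.length
    if rest.any (fun (shape : List Int) => shape.length != ndim) then []  -- ValueError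
    else
      let columns := zipStar (first :: rest)
      if (PySem.List.enumerate columns 0).any (fun (p : Int × List Int) =>
          dimNe axis p.1 && p.2.any (fun v => v != p.2.headD 0))
      then []  -- ValueError
      else
        match axis with
        | none => (((first :: rest).length : Int)) :: first
        | some a =>
          (PySem.List.enumerate columns 0).map (fun (p : Int × List Int) =>
            if p.1 == a then p.2.sum else p.2.headD 0)

-- ===== PRECONDITION & SPEC =====
-- Pre_ excludes exactly the inputs where A raises: empty shapes (IndexError), shapes of
-- differing rank, and columns off the (literal) axis that are not constant (ValueError).
def Pre_combined_shape (shapes : List (List Int)) (axis : Option Int) : Prop :=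
  shapes ≠ [] ∧
  (∀ s ∈ shapes, s.length = (shapes.headD []).length) ∧
  (∀ i < (shapes.headD []).length, axis ≠ some (i : Int) →
    ∀ s ∈ shapes, s.getD i 0 = (shapes.headD []).getD i 0)
instance (shapes : List (List Int)) (axis : Option Int) : Decidable (Pre_combined_shape shapes axis) := by
  unfold Pre_combined_shape; infer_instance

def pvWitness_combined_shape : List (List Int) × Option Int := ([[2, 3], [4, 3]], some 0)

def Spec_combined_shape (shapes : List (List Int)) (axis : Option Int) (out : List Int) : Prop := out = combined_shape_alt shapes axis
instance (shapes : List (List Int)) (axis : Option Int) (out : List Int) : Decidable (Spec_combined_shape shapes axis out) := by unfold Spec_combined_shape; infer_instance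

-- ===== CLAIM (what is proved, stated in full; the proofs are below) =====
def Claim_equal_combined_shape : Prop := ∀ (shapes : List (List Int)) (axis : Option Int), Dom_combined_shape shapes axis → Pre_combined_shape shapes axis → Spec_combined_shape shapes axis (combined_shape shapes axis)

-- ===== LEMMAS AND PROOFS =====

-- zip(*rows) on equal-length nonempty rows is the transpose, column i = map (·.getD i 0).
theorem zipStar_eq (n : Nat) : ∀ (rows : List (List Int)), rows ≠ [] →
    (∀ r ∈ rows, r.length = n) →
    zipStar rows = (List.range n).map (fun i => rows.map (fun r => r.getD i 0)) := by
  induction n with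
  | zero =>
    intro rows hne hlen
    rw [zipStar]
    match rows with
    | r :: rs =>
      have hr : r = [] := List.eq_nil_of_length_eq_zero (hlen r List.mem_cons_self)
      simp [hr]
  | succ n ih =>
    intro rows hne hlen
    rw [zipStar]
    have hnotempty : ∀ r ∈ rows, r ≠ [] := by
      intro r hr hcon
      have := hlen r hr; simp [hcon] at this
    have hcond : ¬ (rows.isEmpty || rows.any (·.isEmpty)) = true := by
      simp only [Bool.or_eq_true, List.isEmpty_iff, List.any_eq_true, not_or, not_exists]
      exact ⟨hne, fun r ⟨hr, hre⟩ => hnotempty r hr hre⟩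
    rw [dif_neg hcond]
    have htne : rows.map List.tail ≠ [] := by simpa using hne
    have htlen : ∀ r ∈ rows.map List.tail, r.length = n := by
      intro r hr
      obtain ⟨s, hs, rfl⟩ := List.mem_map.mp hr
      have := hlen s hs
      simpa [List.length_tail] using congrArg (· - 1) this
    rw [ih _ htne htlen, List.range_succ_eq_map]
    simp only [List.map_cons, List.map_map]
    congr 1
    · apply List.map_congr_left
      intro r hr
      match r, hnotempty r hr with
      | x :: xs, _ => simp
    · apply List.map_congr_left
      intro i _
      simp only [Function.comp]
      apply List.map_congr_left
      intro r hr
      match r, hnotempty r hr with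
      | x :: xs, _ => simp

theorem enum_map_range (n : Nat) (g : Nat → List Int) (F : Int × List Int → Int) :
    (PySem.List.enumerate ((List.range n).map g) 0).map F
      = (List.range n).map (fun (k : Nat) => F ((k : Int), g k)) := by
  induction n with
  | zero => simp [PySem.List.enumerate_nil]
  | succ n ih =>
    rw [List.range_succ, List.map_append, PySem.List.enumerate_append, List.map_append, ih]
    simp [PySem.List.enumerate_cons, PySem.List.enumerate_nil]

theorem foldl_append_ifmap (a : Int) (xs : List Nat) (s : Nat → List Int) (t : Nat → Int) :
    ∀ (init : List Int),
    xs.foldl (fun (combined : List Int) (dim : Nat) =>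
        if (dim : Int) == a then combined ++ [(s dim).sum]
        else combined ++ [t dim]) init
      = init ++ xs.map (fun (dim : Nat) => if (dim : Int) == a then (s dim).sum else t dim) := by
  induction xs with
  | nil => simp
  | cons x xs ih =>
    intro init
    simp only [List.foldl_cons, List.map_cons]
    by_cases h : ((x : Int) == a) = true
    · rw [if_pos h, ih, if_pos h, List.append_assoc, List.singleton_append]
    · rw [if_neg h, ih, if_neg h, List.append_assoc, List.singleton_append]

-- ===== VERDICT (by name: the statement is the Claim_ definition above) =====
theorem combined_shape_spec : Claim_equal_combined_shape := by
  intro shapes axis _ hpre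
  obtain ⟨hne, hlen, heq⟩ := hpre
  unfold Spec_combined_shape
  match shapes, hne with
  | first :: rest, _ =>
    simp only [List.headD_cons] at hlen heq
    have hlen' : ∀ s ∈ rest, s.length = first.length :=
      fun s hs => hlen s (List.mem_cons_of_mem _ hs)
    have hcols : zipStar (first :: rest)
        = (List.range first.length).map
            (fun i => (first :: rest).map (fun r => r.getD i 0)) :=
      zipStar_eq _ _ (by simp) (fun r hr => hlen r hr)
    -- A's validation passes
    have hAcheck : rest.all (fun (shape : List Int) =>
        (first.length == shape.length) &&
        (List.range first.length).all (fun (dim : Nat) =>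
          !(dimNe axis (dim : Int) && (first.getD dim 0 != shape.getD dim 0)))) = true := by
      rw [List.all_eq_true]
      intro shape hshape
      rw [Bool.and_eq_true, List.all_eq_true]
      refine ⟨by simp [hlen' shape hshape], ?_⟩
      intro dim hdim
      have hdim' : dim < first.length := List.mem_range.mp hdim
      rw [Bool.not_eq_eq_eq_not, Bool.not_true, Bool.and_eq_false_iff]
      by_cases hax : axis = some (dim : Int)
      · left; subst hax; simp [dimNe]
      · right
        have h := heq dim hdim' hax shape (List.mem_cons_of_mem _ hshape)
        rw [h]; simp
    -- B's first check passes
    have hBlen : rest.any (fun (shape : List Int) => shape.length != first.length) = false := by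
      rw [List.any_eq_false]
      intro shape hshape
      simp [hlen' shape hshape]
    -- B's second check passes (stated over the canonical columns)
    have hBcheck : (PySem.List.enumerate
        ((List.range first.length).map
          (fun i => (first :: rest).map (fun r => r.getD i 0))) 0).any
        (fun (p : Int × List Int) =>
          dimNe axis p.1 && p.2.any (fun v => v != p.2.headD 0)) = false := by
      rw [List.any_eq_false]
      intro p hp hcon
      rw [PySem.List.mem_enumerate_iff] at hp
      obtain ⟨k, hk, rfl⟩ := hp
      simp only [List.length_map, List.length_range] at hk
      rw [List.getElem_map, List.getElem_range] at hcon
      simp only [zero_add] at hcon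
      rw [Bool.and_eq_true] at hcon
      obtain ⟨h1, h2⟩ := hcon
      by_cases hax : axis = some (k : Int)
      · subst hax; simp [dimNe] at h1
      · rw [List.any_eq_true] at h2
        obtain ⟨v, hv, hvne⟩ := h2
        obtain ⟨r, hr, rfl⟩ := List.mem_map.mp hv
        have h := heq k hk hax r hr
        rw [h] at hvne
        simp only [List.map_cons, List.headD_cons] at hvne
        simp at hvne
    -- now both sides
    simp only [combined_shape, combined_shape_alt, hAcheck, hBlen, hcols, hBcheck,
      Bool.false_eq_true, if_false, if_true]
    cases axis with
    | none => rfl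
    | some a =>
      dsimp only
      rw [foldl_append_ifmap, List.nil_append,
        enum_map_range first.length
          (fun i => (first :: rest).map (fun r => r.getD i 0))
          (fun p => if p.1 == a then p.2.sum else p.2.headD 0)]
      apply List.map_congr_left
      intro k _
      by_cases hka : ((k : Int) == a) = true <;> simp [hka]
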